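-- pv_equiv track=rewrite | github.com/ezychowicz/DSA | ASD/cwiczenia/cwiczenia6.py | bfs_count_paths
-- ===== SOURCE A (Python) =====
-- import queue
--
-- def bfs_count_paths(G,x,y):
--     q = queue.Queue()
--     visited = [0]*(len(G))
--     visited[x] = 1
--     q.put(x)
--     dist = [0]*(len(G))
--     while not q.empty():
--         u = q.get()
--         if u == y:
--             return visited[y] #if >1 return True (>1 najkrotsza sciezka do y)
--         for v in G[u]:
--             if visited[v] == 0:
--                 visited[v] += visited[u]
--                 dist[v] = dist[u] + 1
--                 q.put(v)
--             else:
--                 if dist[v] < dist[u] + 1: #gdy odwiedzony wierzcholek wczesniej ma najkrotsza sciezke krotszą od tej nowo wchodzacej to nie dodawaj do licznika najkrotszych sciezek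
--                     continue
--                 visited[v] += visited[u]
--     return -1
-- ===== SOURCE B (Python) =====
-- def bfs_count_paths(G, x, y):
--     # Layered BFS: cur maps each vertex of the current distance layer to its
--     # number of shortest paths from x; each round builds the next layer's dict
--     # by accumulating counts over the edges leaving cur.
--     n = len(G)
--     seen = [False] * n
--     seen[x] = True
--     cur = {x: 1}
--     while cur:
--         if y in cur:
--             return cur[y]
--         nxt = {}
--         for u, cu in cur.items():
--             for v in G[u]:
--                 if not seen[v]:
--                     nxt[v] = nxt.get(v, 0) + cu
--         for v in nxt:
--             seen[v] = True
--         cur = nxt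
--     return -1
-- ===== Notes on version B (the rewrite author's own statement) =====
-- stated objective: alternative
-- what changed: Replaces the fused vertex-at-a-time queue.Queue BFS that patches shortest-path counts into a visited[] array (with a dist[] array and an early return at y's dequeue) by a layer-at-a-time BFS that maps each distance layer's vertices to their path counts in a dict, accumulates the next layer's dict over the layer's edges, and tests y's membership once per layer; …
-- outside the precondition, e.g. on bfs_count_paths([[1, -1], [0]], 0, 1): A returns 2, B returns 1; on bfs_count_paths([[2], [], []], -3, 2): A returns 1, B returns 1
import Mathlib
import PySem

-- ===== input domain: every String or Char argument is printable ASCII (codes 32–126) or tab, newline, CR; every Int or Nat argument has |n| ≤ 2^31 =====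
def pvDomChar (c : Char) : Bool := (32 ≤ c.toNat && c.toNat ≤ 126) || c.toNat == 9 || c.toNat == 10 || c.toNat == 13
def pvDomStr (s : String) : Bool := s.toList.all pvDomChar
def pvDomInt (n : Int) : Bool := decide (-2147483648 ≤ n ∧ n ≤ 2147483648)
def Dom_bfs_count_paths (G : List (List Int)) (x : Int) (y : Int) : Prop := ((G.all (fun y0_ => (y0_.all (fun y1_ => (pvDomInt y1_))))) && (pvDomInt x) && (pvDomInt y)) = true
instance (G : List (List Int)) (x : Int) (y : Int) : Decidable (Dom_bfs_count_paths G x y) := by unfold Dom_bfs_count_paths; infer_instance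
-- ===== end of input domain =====

-- B replaces A's fused queue.Queue BFS (counts patched into a visited[] array, a dist[]
-- array and per-vertex queue operations) by a layered BFS over dicts of vertex labels:
-- each round maps the current distance layer's vertices to their shortest-path counts
-- and builds the next layer's dict, with a per-layer membership test for y; objective:
-- alternative.

-- ===== PORT A =====
-- Python list indexing with a possibly negative index; exact for -len ≤ i < len,
-- the range Pre_ guarantees for every index A actually uses
def pvIdx (i : Int) (m : Nat) : Nat := (if i < 0 then i + (m : Int) else i).toNat
def pvGetI (l : List Int) (i : Int) : Int := l.getD (pvIdx i l.length) 0
def pvSetI (l : List Int) (i : Int) (v : Int) : List Int := l.set (pvIdx i l.length) v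
def pvRow (G : List (List Int)) (u : Int) : List Int := G.getD (pvIdx u G.length) []

-- the body of A's inner `for v in G[u]` loop, over (visited, dist, enqueued-this-round)
def pvInnerA (u : Int) : List Int → List Int → List Int → List Int → List Int × List Int × List Int
  | [], vis, dst, acc => (vis, dst, acc)
  | v :: ns, vis, dst, acc =>
    if pvGetI vis v = 0 then
      pvInnerA u ns (pvSetI vis v (pvGetI vis v + pvGetI vis u))
        (pvSetI dst v (pvGetI dst u + 1)) (acc ++ [v])
    else if pvGetI dst v < pvGetI dst u + 1 then
      pvInnerA u ns vis dst acc
    else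
      pvInnerA u ns (pvSetI vis v (pvGetI vis v + pvGetI vis u)) dst acc

-- A's `while not q.empty()` loop; fuel = len(G)+1 suffices under Pre_ (proved below)
def pvGoA (G : List (List Int)) (y : Int) : Nat → List Int → List Int → List Int → Int
  | 0, _, _, _ => -1
  | _ + 1, [], _, _ => -1
  | f + 1, u :: q, vis, dst =>
    if u = y then pvGetI vis y
    else
      match pvInnerA u (pvRow G u) vis dst [] with
      | (vis', dst', acc) => pvGoA G y f (q ++ acc) vis' dst'

def bfs_count_paths (G : List (List Int)) (x : Int) (y : Int) : Int :=
  pvGoA G y (G.length + 1) [x] (pvSetI (List.replicate G.length 0) x 1)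
    (List.replicate G.length 0)

-- ===== PORT B =====
-- Python boolean-list indexing/assignment with a possibly negative index
def pvGetB (l : List Bool) (i : Int) : Bool := l.getD (pvIdx i l.length) false
def pvSetB (l : List Bool) (i : Int) (v : Bool) : List Bool := l.set (pvIdx i l.length) v

-- body of B's inner `for v in G[u]` loop, accumulating the next layer's dict
def pvRowB (seenS : List Bool) (cu : Int) : List Int → PySem.Dict Int Int → PySem.Dict Int Int
  | [], nxt => nxt
  | v :: vs, nxt =>
    if pvGetB seenS v then pvRowB seenS cu vs nxt
    else pvRowB seenS cu vs (nxt.insert v (nxt.getD v 0 + cu))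

-- B's `for u, cu in cur.items()` loop
def pvLayerB (G : List (List Int)) (seenS : List Bool) :
    List (Int × Int) → PySem.Dict Int Int → PySem.Dict Int Int
  | [], nxt => nxt
  | (u, cu) :: ps, nxt => pvLayerB G seenS ps (pvRowB seenS cu (pvRow G u) nxt)

-- B's `while cur` loop; fuel = len(G)+1 suffices under Pre_ (proved below)
def pvGoB (G : List (List Int)) (y : Int) : Nat → PySem.Dict Int Int → List Bool → Int
  | 0, _, _ => -1
  | f + 1, cur, seenS =>
    if cur.items = [] then -1
    else if cur.contains y then cur.getD y 0
    else
      pvGoB G y f (pvLayerB G seenS cur.items PySem.Dict.empty)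
        ((pvLayerB G seenS cur.items PySem.Dict.empty).keys.foldl
          (fun s k => pvSetB s k true) seenS)

def bfs_count_paths_alt (G : List (List Int)) (x : Int) (y : Int) : Int :=
  pvGoB G y (G.length + 1) (PySem.Dict.empty.insert x 1)
    (pvSetB (List.replicate G.length false) x true)

-- ===== PRECONDITION & SPEC =====
-- Pre_ keeps the natural domain of an adjacency-list graph — a start vertex A accepts
-- and, unless A stops before traversing (x = y, or x's row is empty), canonical vertex
-- labels 0 ≤ v < len(G) for x and every adjacency entry.  Outside it A raises
-- IndexError or relies on Python's negative-index wraparound (identifying labels v and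
-- v+len(G) in its arrays but not in the `u == y` comparison), which B's per-layer
-- dicts of labels do not reproduce.
def Pre_bfs_count_paths (G : List (List Int)) (x : Int) (y : Int) : Prop :=
  -(G.length : Int) ≤ x ∧ x < (G.length : Int) ∧
  (x = y ∨ pvRow G x = [] ∨
    (0 ≤ x ∧ ∀ row ∈ G, ∀ v ∈ row, 0 ≤ v ∧ v < (G.length : Int)))
instance (G : List (List Int)) (x : Int) (y : Int) : Decidable (Pre_bfs_count_paths G x y) := by
  unfold Pre_bfs_count_paths; infer_instance

def pvWitness_bfs_count_paths : List (List Int) × Int × Int := ([[1, 2], [2], [1]], 0, 2)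

def Spec_bfs_count_paths (G : List (List Int)) (x : Int) (y : Int) (out : Int) : Prop := out = bfs_count_paths_alt G x y
instance (G : List (List Int)) (x : Int) (y : Int) (out : Int) : Decidable (Spec_bfs_count_paths G x y out) := by unfold Spec_bfs_count_paths; infer_instance

-- ===== CLAIM (what is proved, stated in full; the proofs are below) =====
def Claim_equal_bfs_count_paths : Prop := ∀ (G : List (List Int)) (x : Int) (y : Int), Dom_bfs_count_paths G x y → Pre_bfs_count_paths G x y → Spec_bfs_count_paths G x y (bfs_count_paths G x y)

-- ===== LEMMAS AND PROOFS =====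

lemma pvIdx_lt {n : Nat} {i : Int} (h1 : -(n : Int) ≤ i) (h2 : i < (n : Int)) : pvIdx i n < n := by
  unfold pvIdx; split_ifs <;> omega

lemma pvIdx_inj {n : Nat} {v w : Int} (hv0 : 0 ≤ v) (_hvn : v < (n : Int))
    (hw0 : 0 ≤ w) (_hwn : w < (n : Int)) (h : pvIdx v n = pvIdx w n) : v = w := by
  unfold pvIdx at h; split_ifs at h <;> omega

lemma pvSetI_length {l : List Int} {i v : Int} : (pvSetI l i v).length = l.length := by
  simp [pvSetI]

lemma pvGetI_set (l : List Int) (v w a : Int) :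
    pvGetI (pvSetI l v a) w =
      if pvIdx w l.length = pvIdx v l.length ∧ pvIdx v l.length < l.length then a
      else pvGetI l w := by
  unfold pvGetI pvSetI
  rw [List.length_set]
  rw [List.getD_eq_getElem?_getD, List.getD_eq_getElem?_getD, List.getElem?_set]
  by_cases h1 : pvIdx w l.length = pvIdx v l.length ∧ pvIdx v l.length < l.length
  · rw [if_pos h1, if_pos h1.1.symm, if_pos h1.2]
    simp
  · rw [if_neg h1]
    by_cases h2 : pvIdx v l.length = pvIdx w l.length
    · have h3 : ¬ pvIdx v l.length < l.length := by
        intro h4; exact h1 ⟨h2.symm, h4⟩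
      rw [if_pos h2, if_neg h3]
      rw [List.getElem?_eq_none (by omega)]
    · rw [if_neg h2]

lemma pvGetI_set_n {l : List Int} {n : Nat} (hl : l.length = n) (v w a : Int) :
    pvGetI (pvSetI l v a) w =
      if pvIdx w n = pvIdx v n ∧ pvIdx v n < n then a else pvGetI l w := by
  subst hl; exact pvGetI_set l v w a

lemma pvGetI_set_self {l : List Int} {n : Nat} {v : Int} (a : Int) (hl : l.length = n)
    (h : pvIdx v n < n) : pvGetI (pvSetI l v a) v = a := by
  rw [pvGetI_set]; simp [hl, h]

lemma pvGetB_set (l : List Bool) (v w : Int) (a : Bool) :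
    pvGetB (pvSetB l v a) w =
      if pvIdx w l.length = pvIdx v l.length ∧ pvIdx v l.length < l.length then a
      else pvGetB l w := by
  unfold pvGetB pvSetB
  rw [List.length_set]
  rw [List.getD_eq_getElem?_getD, List.getD_eq_getElem?_getD, List.getElem?_set]
  by_cases h1 : pvIdx w l.length = pvIdx v l.length ∧ pvIdx v l.length < l.length
  · rw [if_pos h1, if_pos h1.1.symm, if_pos h1.2]
    simp
  · rw [if_neg h1]
    by_cases h2 : pvIdx v l.length = pvIdx w l.length
    · have h3 : ¬ pvIdx v l.length < l.length := by
        intro h4; exact h1 ⟨h2.symm, h4⟩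
      rw [if_pos h2, if_neg h3]
      rw [List.getElem?_eq_none (by omega)]
    · rw [if_neg h2]

lemma pvGetB_set_n {l : List Bool} {n : Nat} (hl : l.length = n) (v w : Int) (a : Bool) :
    pvGetB (pvSetB l v a) w =
      if pvIdx w n = pvIdx v n ∧ pvIdx v n < n then a else pvGetB l w := by
  subst hl; exact pvGetB_set l v w a

lemma pvSetB_length {l : List Bool} {i : Int} {v : Bool} :
    (pvSetB l i v).length = l.length := by
  simp [pvSetB]

lemma pvGetB_replicate (m : Nat) (i : Int) : pvGetB (List.replicate m false) i = false := by
  unfold pvGetB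
  rcases Nat.lt_or_ge (pvIdx i (List.replicate m false).length)
      (List.replicate m false).length with h | h
  · rw [List.getD_eq_getElem?_getD, List.getElem?_eq_getElem h]
    simp
  · rw [List.getD_eq_getElem?_getD, List.getElem?_eq_none h]
    rfl

lemma pvFoldSet_length (ks : List Int) (a : List Bool) :
    (ks.foldl (fun a s => pvSetB a s true) a).length = a.length := by
  induction ks generalizing a with
  | nil => rfl
  | cons k ks ih => rw [List.foldl_cons, ih, pvSetB_length]

lemma pvGetB_foldl_set {n : Nat} (ks : List Int) (hk : ∀ s ∈ ks, 0 ≤ s ∧ s < (n : Int)) :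
    ∀ (a : List Bool), a.length = n → ∀ w : Int, 0 ≤ w → w < (n : Int) →
      (pvGetB (ks.foldl (fun a s => pvSetB a s true) a) w = true ↔
        pvGetB a w = true ∨ w ∈ ks) := by
  induction ks with
  | nil =>
    intro a _ w _ _
    simp
  | cons k ks ih =>
    intro a ha w h1 h2
    obtain ⟨hk1, hk2⟩ := hk k (List.mem_cons_self ..)
    have hk' : ∀ s ∈ ks, 0 ≤ s ∧ s < (n : Int) := fun s hs => hk s (List.mem_cons_of_mem _ hs)
    rw [List.foldl_cons]
    rw [ih hk' (pvSetB a k true) (by rw [pvSetB_length, ha]) w h1 h2]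
    by_cases he : pvIdx w n = pvIdx k n
    · have hwk : w = k := pvIdx_inj h1 h2 hk1 hk2 he
    
      subst hwk
      have hget : pvGetB (pvSetB a w true) w = true := by
        rw [pvGetB_set_n ha, if_pos ⟨he, pvIdx_lt (by omega) hk2⟩]
      simp [hget, List.mem_cons]
    · rw [pvGetB_set_n ha, if_neg (fun hc => he hc.1)]
      have hwk : w ≠ k := fun hh => he (by rw [hh])
      simp [hwk]

lemma pvCount0_set (l : List Int) (k : Nat) (hk : k < l.length) (a : Int) :
    (l.set k a).count 0 + (if l[k] = 0 then 1 else 0) = l.count 0 + (if a = 0 then 1 else 0) := by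
  induction l generalizing k with
  | nil => simp at hk
  | cons b l ih =>
    cases k with
    | zero =>
      simp only [List.set_cons_zero, List.count_cons, List.getElem_cons_zero]
      by_cases hb : b = 0 <;> by_cases ha : a = 0 <;> simp [hb, ha]
    | succ k =>
      have hk' : k < l.length := by simpa using hk
      have h := ih k hk'
      simp only [List.set_cons_succ, List.count_cons, List.getElem_cons_succ]
      by_cases hb : b = 0 <;> by_cases hl : l[k] = 0 <;>
        simp [hb, hl] at h ⊢ <;> omega

-- The loop invariant tying A's (visited, dist, queue) to B's layered state.
-- seenO: labels of layers < d; cur/nxt: item lists of B's layer dicts.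
def pvInv (n : Nat) (d : Int) (seenO : List Int) (cur nxt : List (Int × Int))
    (vis dst : List Int) : Prop :=
  vis.length = n ∧ dst.length = n ∧
  (∀ p ∈ cur, 0 ≤ p.1 ∧ p.1 < (n : Int) ∧ 1 ≤ p.2 ∧
    pvGetI vis p.1 = p.2 ∧ pvGetI dst p.1 = d) ∧
  (∀ p ∈ nxt, 0 ≤ p.1 ∧ p.1 < (n : Int) ∧ 1 ≤ p.2 ∧
    pvGetI vis p.1 = p.2 ∧ pvGetI dst p.1 = d + 1) ∧
  (∀ s ∈ seenO, 0 ≤ s ∧ s < (n : Int) ∧ pvGetI dst s < d ∧ pvGetI vis s ≠ 0) ∧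
  (∀ s : Int, 0 ≤ s → s < (n : Int) → s ∉ seenO → s ∉ cur.map Prod.fst →
    s ∉ nxt.map Prod.fst → pvGetI vis s = 0) ∧
  seenO.Nodup ∧ (cur.map Prod.fst).Nodup ∧ (nxt.map Prod.fst).Nodup ∧
  (∀ s ∈ seenO, s ∉ cur.map Prod.fst ∧ s ∉ nxt.map Prod.fst) ∧
  (∀ s ∈ cur.map Prod.fst, s ∉ nxt.map Prod.fst)

-- the two inner loops in lock step
lemma pvInner_sim {n : Nat} {d : Int} {seenO : List Int} {cur : List (Int × Int)}
    {u cu : Int} (hucur : (u, cu) ∈ cur)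
    {seenS : List Bool}
    (hseen : ∀ w : Int, 0 ≤ w → w < (n : Int) → (pvGetB seenS w = true ↔
      w ∈ seenO ∨ w ∈ cur.map Prod.fst)) :
    ∀ (ns : List Int), (∀ v ∈ ns, 0 ≤ v ∧ v < (n : Int)) →
    ∀ (vis dst : List Int) (nxtD : PySem.Dict Int Int) (acc : List Int),
      pvInv n d seenO cur nxtD.items vis dst →
    ∃ vis' dst' newKs,
      pvInnerA u ns vis dst acc = (vis', dst', acc ++ newKs) ∧
      (pvRowB seenS cu ns nxtD).items.map Prod.fst = nxtD.items.map Prod.fst ++ newKs ∧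
      pvInv n d seenO cur (pvRowB seenS cu ns nxtD).items vis' dst' ∧
      vis.count 0 = vis'.count 0 + newKs.length := by
  intro ns
  induction ns with
  | nil =>
    intro _ vis dst nxtD acc hInv
    exact ⟨vis, dst, [], by simp [pvInnerA], by simp [pvRowB], by simpa [pvRowB] using hInv,
      by simp⟩
  | cons v ns ih =>
    intro hns vis dst nxtD acc hInv
    obtain ⟨hlv, hld, hcur, hnxt, hseenO, hzero, hndS, hndC, hndX, hdsjS, hdsjC⟩ := id hInv
    obtain ⟨hu0, hun, hu1, huv, hud⟩ := hcur (u, cu) hucur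
    obtain ⟨hv0, hvn⟩ := hns v (List.mem_cons_self ..)
    have hns' : ∀ w ∈ ns, 0 ≤ w ∧ w < (n : Int) :=
      fun w hw => hns w (List.mem_cons_of_mem _ hw)
    have hvnat : pvIdx v n < n := pvIdx_lt (by omega) hvn
    have hlt : pvIdx v vis.length < vis.length := by rw [hlv]; exact hvnat
    have hndK : nxtD.keys.Nodup := hndX
    by_cases h0 : pvGetI vis v = 0
    · -- v undiscovered: A enqueues and stamps count/dist; B starts a nxt entry
      have hvs : v ∉ seenO := fun h => (hseenO _ h).2.2.2 h0
      have hvc : v ∉ cur.map Prod.fst := by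
        intro h
        obtain ⟨p, hp, hpe⟩ := List.mem_map.1 h
        obtain ⟨_, _, h1, h2, _⟩ := hcur p hp
        rw [hpe, h0] at h2
        omega
      have hvx : v ∉ nxtD.items.map Prod.fst := by
        intro h
        obtain ⟨p, hp, hpe⟩ := List.mem_map.1 h
        obtain ⟨_, _, h1, h2, _⟩ := hnxt p hp
        rw [hpe, h0] at h2
        omega
      have hsm : pvGetB seenS v = false := by
        rw [Bool.eq_false_iff]
        intro h
        rcases (hseen v hv0 hvn).1 h with h | h
        exacts [hvs h, hvc h]
      have hdc : nxtD.contains v = false := by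
        rw [PySem.Dict.contains_eq_decide_mem_keys]
        simpa [PySem.Dict.keys] using hvx
      have hgd0 : nxtD.getD v 0 = 0 := PySem.Dict.getD_of_not_contains nxtD 0 hdc
      have hitems : (nxtD.insert v (nxtD.getD v 0 + cu)).items =
          nxtD.items ++ [(v, nxtD.getD v 0 + cu)] :=
        PySem.Dict.items_insert_of_not_contains nxtD _ hdc
      have hBrow : pvRowB seenS cu (v :: ns) nxtD =
          pvRowB seenS cu ns (nxtD.insert v (nxtD.getD v 0 + cu)) := by
        simp only [pvRowB]
        rw [if_neg (by rw [hsm]; decide)]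
      have hInv1 : pvInv n d seenO cur ((nxtD.insert v (nxtD.getD v 0 + cu)).items)
          (pvSetI vis v (pvGetI vis v + pvGetI vis u))
          (pvSetI dst v (pvGetI dst u + 1)) := by
        rw [hitems]
        have hlabels : (nxtD.items ++ [(v, nxtD.getD v 0 + cu)]).map Prod.fst =
            nxtD.items.map Prod.fst ++ [v] := by simp
        refine ⟨by simp [pvSetI_length, hlv], by simp [pvSetI_length, hld], ?_, ?_, ?_, ?_,
          hndS, hndC, ?_, ?_, ?_⟩
        · intro p hp
          obtain ⟨b1, b2, b3, b4, b5⟩ := hcur p hp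
          have hne : p.1 ≠ v := fun he => hvc (he ▸ List.mem_map.2 ⟨p, hp, rfl⟩)
          refine ⟨b1, b2, b3, ?_, ?_⟩
          · rw [pvGetI_set_n hlv, if_neg (fun hc => hne (pvIdx_inj b1 b2 hv0 hvn hc.1))]
            exact b4
          · rw [pvGetI_set_n hld, if_neg (fun hc => hne (pvIdx_inj b1 b2 hv0 hvn hc.1))]
            exact b5
        · intro p hp
          rcases List.mem_append.1 hp with hp | hp
          · obtain ⟨b1, b2, b3, b4, b5⟩ := hnxt p hp
            have hne : v ≠ p.1 := fun he => hvx (he ▸ List.mem_map.2 ⟨p, hp, rfl⟩)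
            refine ⟨b1, b2, b3, ?_, ?_⟩
            · rw [pvGetI_set_n hlv,
                if_neg (fun hc => hne (pvIdx_inj b1 b2 hv0 hvn hc.1).symm)]
              exact b4
            · rw [pvGetI_set_n hld,
                if_neg (fun hc => hne (pvIdx_inj b1 b2 hv0 hvn hc.1).symm)]
              exact b5
          · have hp' : p = (v, nxtD.getD v 0 + cu) := by simpa using hp
            subst hp'
            refine ⟨hv0, hvn, by rw [hgd0]; omega, ?_, ?_⟩
            · rw [pvGetI_set_n hlv, if_pos ⟨rfl, hvnat⟩, h0, huv, hgd0]
            · rw [pvGetI_set_n hld, if_pos ⟨rfl, hvnat⟩, hud]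
        · intro s hs
          obtain ⟨c1, c2, c3, c4⟩ := hseenO s hs
          have hne : v ≠ s := fun he => hvs (he ▸ hs)
          refine ⟨c1, c2, ?_, ?_⟩
          · rw [pvGetI_set_n hld, if_neg (fun hc => hne (pvIdx_inj c1 c2 hv0 hvn hc.1).symm)]
            exact c3
          · rw [pvGetI_set_n hlv, if_neg (fun hc => hne (pvIdx_inj c1 c2 hv0 hvn hc.1).symm)]
            exact c4
        · intro s s0 sn hso hsc hsx
          rw [hlabels] at hsx
          simp only [List.mem_append, List.mem_singleton, not_or] at hsx
          rw [pvGetI_set_n hlv, if_neg (fun hc => hsx.2 (pvIdx_inj s0 sn hv0 hvn hc.1))]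
          exact hzero s s0 sn hso hsc hsx.1
        · rw [hlabels]
          exact List.Nodup.append hndX (List.nodup_singleton _)
            (by simpa [List.disjoint_singleton] using hvx)
        · intro s hs
          obtain ⟨d1, d2⟩ := hdsjS s hs
          rw [hlabels]
          simp only [List.mem_append, List.mem_singleton, not_or]
          exact ⟨d1, d2, fun he => hvs (he ▸ hs)⟩
        · intro s hs
          have d2 := hdsjC s hs
          rw [hlabels]
          simp only [List.mem_append, List.mem_singleton, not_or]
          exact ⟨d2, fun he => hvc (he ▸ hs)⟩
      obtain ⟨vis', dst', newKs, e1, e2, e3, e4⟩ :=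
        ih hns' (pvSetI vis v (pvGetI vis v + pvGetI vis u)) (pvSetI dst v (pvGetI dst u + 1))
          (nxtD.insert v (nxtD.getD v 0 + cu)) (acc ++ [v]) hInv1
      refine ⟨vis', dst', v :: newKs, ?_, ?_, ?_, ?_⟩
      · rw [show pvInnerA u (v :: ns) vis dst acc = pvInnerA u ns
            (pvSetI vis v (pvGetI vis v + pvGetI vis u)) (pvSetI dst v (pvGetI dst u + 1))
            (acc ++ [v]) from by simp [pvInnerA, h0], e1]
        simp
      · rw [hBrow, e2, hitems]
        simp
      · rw [hBrow]
        exact e3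
      · have hcount := pvCount0_set vis (pvIdx v vis.length) hlt (pvGetI vis v + pvGetI vis u)
        rw [show vis[pvIdx v vis.length] = 0 from by
          rw [show vis[pvIdx v vis.length] = pvGetI vis v from by
            simp [pvGetI, List.getD_eq_getElem?_getD, List.getElem?_eq_getElem hlt]]
          exact h0] at hcount
        rw [if_neg (by rw [h0, huv]; omega : ¬(pvGetI vis v + pvGetI vis u = 0))] at hcount
        have : (pvSetI vis v (pvGetI vis v + pvGetI vis u)).count 0 + 1 = vis.count 0 := by
          simpa [pvSetI] using hcount
        simp only [List.length_cons]
        omega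
    · -- v already has a count
      have hmem : v ∈ seenO ∨ v ∈ cur.map Prod.fst ∨ v ∈ nxtD.items.map Prod.fst := by
        by_contra h
        push_neg at h
        exact h0 (hzero _ hv0 hvn h.1 h.2.1 h.2.2)
      have hBskip : ∀ (hsm : pvGetB seenS v = true)
          (hlt2 : pvGetI dst v < pvGetI dst u + 1),
          ∃ vis' dst' newKs,
            pvInnerA u (v :: ns) vis dst acc = (vis', dst', acc ++ newKs) ∧
            (pvRowB seenS cu (v :: ns) nxtD).items.map Prod.fst =
              nxtD.items.map Prod.fst ++ newKs ∧
            pvInv n d seenO cur (pvRowB seenS cu (v :: ns) nxtD).items vis' dst' ∧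
            vis.count 0 = vis'.count 0 + newKs.length := by
        intro hsm hlt2
        rw [show pvInnerA u (v :: ns) vis dst acc = pvInnerA u ns vis dst acc from by
            simp [pvInnerA, h0, hlt2],
          show pvRowB seenS cu (v :: ns) nxtD = pvRowB seenS cu ns nxtD from by
            simp only [pvRowB]
            rw [if_pos hsm]]
        exact ih hns' vis dst nxtD acc hInv
      rcases hmem with hm | hm | hm
      · refine hBskip ((hseen v hv0 hvn).2 (Or.inl hm)) ?_
        have h3 := (hseenO _ hm).2.2.1
        rw [hud]
        omega
      · refine hBskip ((hseen v hv0 hvn).2 (Or.inr hm)) ?_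
        obtain ⟨p, hp, hpe⟩ := List.mem_map.1 hm
        have h5 := (hcur p hp).2.2.2.2
        rw [← hpe, h5, hud]
        omega
      · -- v is already in the next layer: both sides add cu to its count
        obtain ⟨⟨pv, w⟩, hp, hpe⟩ := List.mem_map.1 hm
        simp only at hpe
        rw [hpe] at hp
        obtain ⟨e1', e2', e3', e4', e5'⟩ := hnxt (v, w) hp
        simp only at e1' e2' e3' e4' e5'
        have hvs : v ∉ seenO := fun h => (hdsjS _ h).2 hm
        have hvc : v ∉ cur.map Prod.fst := fun h => hdsjC _ h hm
        have hsm : pvGetB seenS v = false := by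
          rw [Bool.eq_false_iff]
          intro h
          rcases (hseen v hv0 hvn).1 h with h | h
          exacts [hvs h, hvc h]
        have hpc : nxtD.contains v = true := by
          rw [PySem.Dict.contains_eq_decide_mem_keys]
          simpa [PySem.Dict.keys] using hm
        have hgd : nxtD.getD v 0 = w := PySem.Dict.getD_of_mem_items nxtD hp hndK 0
        have hnlt : ¬ pvGetI dst v < pvGetI dst u + 1 := by
          rw [e5', hud]
          omega
        have hBrow : pvRowB seenS cu (v :: ns) nxtD =
            pvRowB seenS cu ns (nxtD.insert v (nxtD.getD v 0 + cu)) := by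
          simp only [pvRowB]
          rw [if_neg (by rw [hsm]; decide)]
        have hitems : (nxtD.insert v (nxtD.getD v 0 + cu)).items =
            nxtD.items.map (fun q => if q.1 == v then (v, nxtD.getD v 0 + cu) else q) :=
          PySem.Dict.items_insert_of_contains nxtD _ hpc
        have hkeep : (nxtD.insert v (nxtD.getD v 0 + cu)).items.map Prod.fst =
            nxtD.items.map Prod.fst := by
          rw [hitems, List.map_map]
          apply List.map_congr_left
          intro q hq
          by_cases hqv : q.1 = v
          · simp [Function.comp, hqv]
          · simp [Function.comp, hqv]
        have hInv1 : pvInv n d seenO cur ((nxtD.insert v (nxtD.getD v 0 + cu)).items)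
            (pvSetI vis v (pvGetI vis v + pvGetI vis u)) dst := by
          refine ⟨by simp [pvSetI_length, hlv], hld, ?_, ?_, ?_, ?_,
            hndS, hndC, by rw [hkeep]; exact hndX, ?_, ?_⟩
          · intro p hp'
            obtain ⟨b1, b2, b3, b4, b5⟩ := hcur p hp'
            have hne : v ≠ p.1 := fun he => hvc (he ▸ List.mem_map.2 ⟨p, hp', rfl⟩)
            refine ⟨b1, b2, b3, ?_, b5⟩
            rw [pvGetI_set_n hlv, if_neg (fun hc => hne (pvIdx_inj b1 b2 hv0 hvn hc.1).symm)]
            exact b4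
          · intro q hq
            rw [hitems] at hq
            obtain ⟨q0, hq0, hq0e⟩ := List.mem_map.1 hq
            by_cases hqv : q0.1 = v
            · have hq0' : q0 = (v, w) :=
                List.inj_on_of_nodup_map hndX hq0 hp hqv
              subst hq0'
              simp only [beq_self_eq_true, if_true] at hq0e
              subst hq0e
              refine ⟨hv0, hvn, by rw [hgd]; omega, ?_, e5'⟩
              simp only
              rw [pvGetI_set_n hlv, if_pos ⟨rfl, hvnat⟩, e4', huv, hgd]
            · rw [if_neg (by simpa using hqv)] at hq0e
              subst hq0e
              obtain ⟨b1, b2, b3, b4, b5⟩ := hnxt q0 hq0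
              refine ⟨b1, b2, b3, ?_, b5⟩
              rw [pvGetI_set_n hlv,
                if_neg (show ¬(pvIdx q0.1 n = pvIdx v n ∧ pvIdx v n < n) from
                  fun hc => hqv (pvIdx_inj b1 b2 hv0 hvn hc.1))]
              exact b4
          · intro s hs
            obtain ⟨c1, c2, c3, c4⟩ := hseenO s hs
            have hne : v ≠ s := fun he => hvs (he ▸ hs)
            refine ⟨c1, c2, c3, ?_⟩
            rw [pvGetI_set_n hlv, if_neg (fun hc => hne (pvIdx_inj c1 c2 hv0 hvn hc.1).symm)]
            exact c4
          · intro s s0 sn hso hsc hsx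
            rw [hkeep] at hsx
            rw [pvGetI_set_n hlv, if_neg (show ¬(pvIdx s n = pvIdx v n ∧ pvIdx v n < n) from
              fun hc => hsx (by rw [pvIdx_inj s0 sn hv0 hvn hc.1]; exact hm))]
            exact hzero s s0 sn hso hsc hsx
          · intro s hs
            rw [hkeep]
            exact hdsjS s hs
          · intro s hs
            rw [hkeep]
            exact hdsjC s hs
        obtain ⟨vis', dst', newKs, f1, f2, f3, f4⟩ :=
          ih hns' (pvSetI vis v (pvGetI vis v + pvGetI vis u)) dst
            (nxtD.insert v (nxtD.getD v 0 + cu)) acc hInv1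
        refine ⟨vis', dst', newKs, ?_, ?_, ?_, ?_⟩
        · rw [show pvInnerA u (v :: ns) vis dst acc = pvInnerA u ns
              (pvSetI vis v (pvGetI vis v + pvGetI vis u)) dst acc from by
            simp [pvInnerA, h0, hnlt], f1]
        · rw [hBrow, f2, hkeep]
        · rw [hBrow]
          exact f3
        · have hcount := pvCount0_set vis (pvIdx v vis.length) hlt (pvGetI vis v + pvGetI vis u)
          rw [show vis[pvIdx v vis.length] = w from by
            rw [show vis[pvIdx v vis.length] = pvGetI vis v from by
              simp [pvGetI, List.getD_eq_getElem?_getD, List.getElem?_eq_getElem hlt]]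
            exact e4'] at hcount
          rw [if_neg (by omega : ¬(w = 0))] at hcount
          rw [if_neg (by rw [e4', huv]; omega : ¬(pvGetI vis v + pvGetI vis u = 0))] at hcount
          have : (pvSetI vis v (pvGetI vis v + pvGetI vis u)).count 0 = vis.count 0 := by
            simpa [pvSetI] using hcount
          omega

-- one dequeue step of A corresponds to one item of B's layer loop
lemma pvStepOne {n : Nat} {d : Int} {seenO : List Int} {cur : List (Int × Int)}
    {u cu : Int} (hucur : (u, cu) ∈ cur)
    {seenS : List Bool}
    (hseen : ∀ w : Int, 0 ≤ w → w < (n : Int) → (pvGetB seenS w = true ↔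
      w ∈ seenO ∨ w ∈ cur.map Prod.fst))
    {G : List (List Int)} (hn : n = G.length)
    (hG : ∀ row ∈ G, ∀ v ∈ row, 0 ≤ v ∧ v < (G.length : Int))
    {vis dst : List Int} {nxtD : PySem.Dict Int Int}
    (hInv : pvInv n d seenO cur nxtD.items vis dst) :
    ∃ vis' dst' newKs,
      pvInnerA u (pvRow G u) vis dst [] = (vis', dst', newKs) ∧
      (pvRowB seenS cu (pvRow G u) nxtD).items.map Prod.fst =
        nxtD.items.map Prod.fst ++ newKs ∧
      pvInv n d seenO cur (pvRowB seenS cu (pvRow G u) nxtD).items vis' dst' ∧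
      vis.count 0 = vis'.count 0 + newKs.length := by
  have hns : ∀ v ∈ pvRow G u, 0 ≤ v ∧ v < (n : Int) := by
    intro v hv
    subst hn
    rcases Nat.lt_or_ge (pvIdx u G.length) G.length with hrow | hrow
    · have hmem : pvRow G u ∈ G := by
        simp [pvRow, List.getD_eq_getElem?_getD, List.getElem?_eq_getElem hrow]
      exact hG _ hmem v hv
    · rw [pvRow, List.getD_eq_getElem?_getD, List.getElem?_eq_none hrow] at hv
      simp at hv
  obtain ⟨vis', dst', newKs, h1, h2, h3, h4⟩ :=
    pvInner_sim hucur hseen (pvRow G u) hns vis dst nxtD [] hInv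
  exact ⟨vis', dst', newKs, by simpa using h1, h2, h3, h4⟩

-- A runs through the remaining current layer; B has already finished it
lemma pvLayer_sim {G : List (List Int)} {y : Int} {n : Nat} (hn : n = G.length)
    (hG : ∀ row ∈ G, ∀ v ∈ row, 0 ≤ v ∧ v < (G.length : Int))
    {d : Int} {seenO : List Int} {cur : List (Int × Int)}
    {seenS : List Bool}
    (hseen : ∀ w : Int, 0 ≤ w → w < (n : Int) → (pvGetB seenS w = true ↔
      w ∈ seenO ∨ w ∈ cur.map Prod.fst))
    (hy : y ∉ cur.map Prod.fst) :
    ∀ (ps : List (Int × Int)), (∀ p ∈ ps, p ∈ cur) →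
    ∀ (nxtD : PySem.Dict Int Int) (vis dst : List Int) (fA : Nat),
      pvInv n d seenO cur nxtD.items vis dst →
      ps.length + (nxtD.items.map Prod.fst).length + vis.count 0 + 1 ≤ fA →
    ∃ vis' dst',
      pvGoA G y fA (ps.map Prod.fst ++ nxtD.items.map Prod.fst) vis dst =
        pvGoA G y (fA - ps.length)
          ((pvLayerB G seenS ps nxtD).items.map Prod.fst) vis' dst' ∧
      pvInv n d seenO cur (pvLayerB G seenS ps nxtD).items vis' dst' ∧
      ((pvLayerB G seenS ps nxtD).items.map Prod.fst).length + vis'.count 0 =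
        (nxtD.items.map Prod.fst).length + vis.count 0 := by
  intro ps
  induction ps with
  | nil =>
    intro _ nxtD vis dst fA hInv _
    exact ⟨vis, dst, by simp [pvLayerB], by simpa [pvLayerB] using hInv, by simp [pvLayerB]⟩
  | cons p ps ih =>
    obtain ⟨u, cu⟩ := p
    intro hps nxtD vis dst fA hInv hfA
    have hucur : (u, cu) ∈ cur := hps (u, cu) (List.mem_cons_self ..)
    cases fA with
    | zero => simp at hfA
    | succ f =>
      have hne : u ≠ y := fun he => hy (he ▸ List.mem_map.2 ⟨(u, cu), hucur, rfl⟩)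
      obtain ⟨vis1, dst1, newKs, s1, s2, s3, s4⟩ := pvStepOne hucur hseen hn hG hInv
      obtain ⟨vis', dst', g1, g2, g3⟩ := ih (fun q hq => hps q (List.mem_cons_of_mem _ hq))
        (pvRowB seenS cu (pvRow G u) nxtD) vis1 dst1 f s3
        (by
          have hlen2 : ((pvRowB seenS cu (pvRow G u) nxtD).items.map Prod.fst).length =
              (nxtD.items.map Prod.fst).length + newKs.length := by
            rw [s2]; simp
          simp only [List.length_cons] at hfA
          omega)
      refine ⟨vis', dst', ?_, ?_, ?_⟩
      · rw [show (((u, cu) :: ps).map Prod.fst ++ nxtD.items.map Prod.fst) =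
            u :: (ps.map Prod.fst ++ nxtD.items.map Prod.fst) from by simp]
        simp only [pvGoA]
        rw [if_neg hne, s1]
        rw [show (ps.map Prod.fst ++ nxtD.items.map Prod.fst) ++ newKs =
            ps.map Prod.fst ++ (pvRowB seenS cu (pvRow G u) nxtD).items.map Prod.fst from by
          rw [s2, List.append_assoc], g1]
        rw [show pvLayerB G seenS ((u, cu) :: ps) nxtD =
            pvLayerB G seenS ps (pvRowB seenS cu (pvRow G u) nxtD) from by simp [pvLayerB]]
        rw [show (f + 1) - (((u, cu) :: ps).length) = f - ps.length from by
          simp [List.length_cons]]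
      · rw [show pvLayerB G seenS ((u, cu) :: ps) nxtD =
            pvLayerB G seenS ps (pvRowB seenS cu (pvRow G u) nxtD) from by simp [pvLayerB]]
        exact g2
      · rw [show pvLayerB G seenS ((u, cu) :: ps) nxtD =
            pvLayerB G seenS ps (pvRowB seenS cu (pvRow G u) nxtD) from by simp [pvLayerB]]
        have hlen2 : ((pvRowB seenS cu (pvRow G u) nxtD).items.map Prod.fst).length =
            (nxtD.items.map Prod.fst).length + newKs.length := by
          rw [s2]; simp
        omega

-- when y sits in the current layer, A returns its stored count
lemma pvRunToY {G : List (List Int)} {y : Int} {n : Nat} (hn : n = G.length)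
    (hG : ∀ row ∈ G, ∀ v ∈ row, 0 ≤ v ∧ v < (G.length : Int))
    {d : Int} {seenO : List Int} {cur : List (Int × Int)}
    {seenS : List Bool}
    (hseen : ∀ w : Int, 0 ≤ w → w < (n : Int) → (pvGetB seenS w = true ↔
      w ∈ seenO ∨ w ∈ cur.map Prod.fst))
    {wy : Int} (hwy : (y, wy) ∈ cur) :
    ∀ (ps : List (Int × Int)), (∀ p ∈ ps, p ∈ cur) → y ∈ ps.map Prod.fst →
    ∀ (nxtD : PySem.Dict Int Int) (vis dst : List Int) (fA : Nat),
      pvInv n d seenO cur nxtD.items vis dst →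
      ps.length + (nxtD.items.map Prod.fst).length + vis.count 0 + 1 ≤ fA →
      pvGoA G y fA (ps.map Prod.fst ++ nxtD.items.map Prod.fst) vis dst = wy := by
  intro ps
  induction ps with
  | nil =>
    intro _ hyps
    simp at hyps
  | cons p ps ih =>
    obtain ⟨u, cu⟩ := p
    intro hps hyps nxtD vis dst fA hInv hfA
    have hucur : (u, cu) ∈ cur := hps (u, cu) (List.mem_cons_self ..)
    cases fA with
    | zero => simp at hfA
    | succ f =>
      by_cases hey : u = y
      · rw [show (((u, cu) :: ps).map Prod.fst ++ nxtD.items.map Prod.fst) =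
            u :: (ps.map Prod.fst ++ nxtD.items.map Prod.fst) from by simp]
        simp only [pvGoA]
        rw [if_pos hey]
        have h1 := (hInv.2.2.1 (y, wy) hwy).2.2.2.1
        simpa using h1
      · rw [show (((u, cu) :: ps).map Prod.fst ++ nxtD.items.map Prod.fst) =
            u :: (ps.map Prod.fst ++ nxtD.items.map Prod.fst) from by simp]
        simp only [pvGoA]
        rw [if_neg hey]
        obtain ⟨vis1, dst1, newKs, s1, s2, s3, s4⟩ := pvStepOne hucur hseen hn hG hInv
        rw [s1]
        rw [show (ps.map Prod.fst ++ nxtD.items.map Prod.fst) ++ newKs =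
            ps.map Prod.fst ++ (pvRowB seenS cu (pvRow G u) nxtD).items.map Prod.fst from by
          rw [s2, List.append_assoc]]
        have hyps' : y ∈ ps.map Prod.fst := by
          rcases List.mem_map.1 hyps with ⟨q, hq, hqe⟩
          rcases List.mem_cons.1 hq with h | h
          · exact absurd (by rw [h] at hqe; exact hqe) hey
          · exact List.mem_map.2 ⟨q, h, hqe⟩
        have hlen2 : ((pvRowB seenS cu (pvRow G u) nxtD).items.map Prod.fst).length =
            (nxtD.items.map Prod.fst).length + newKs.length := by
          rw [s2]; simp
        exact ih (fun q hq => hps q (List.mem_cons_of_mem _ hq)) hyps'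
          (pvRowB seenS cu (pvRow G u) nxtD) vis1 dst1 f s3
          (by simp only [List.length_cons] at hfA; omega)

-- finishing a layer shifts the invariant to distance d+1
lemma pvNextLayer {n : Nat} {d : Int} {seenO : List Int} {cur nxtI : List (Int × Int)}
    {vis dst : List Int} (hInv : pvInv n d seenO cur nxtI vis dst) :
    pvInv n (d + 1) (seenO ++ cur.map Prod.fst) nxtI [] vis dst := by
  obtain ⟨hlv, hld, hcur, hnxt, hseenO, hzero, hndS, hndC, hndX, hdsjS, hdsjC⟩ := hInv
  refine ⟨hlv, hld, hnxt, by simp, ?_, ?_, ?_, hndX, by simp, ?_, by simp⟩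
  · intro s hs
    rcases List.mem_append.1 hs with hs | hs
    · obtain ⟨c1, c2, c3, c4⟩ := hseenO s hs
      exact ⟨c1, c2, by omega, c4⟩
    · obtain ⟨p, hp, hpe⟩ := List.mem_map.1 hs
      obtain ⟨b1, b2, b3, b4, b5⟩ := hcur p hp
      refine ⟨by rw [← hpe]; exact b1, by rw [← hpe]; exact b2, ?_, ?_⟩
      · rw [← hpe, b5]; omega
      · rw [← hpe, b4]; omega
  · intro s s0 sn hvs hvc _
    simp only [List.mem_append, not_or] at hvs
    exact hzero s s0 sn hvs.1 hvs.2 hvc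
  · exact List.Nodup.append hndS hndC (fun a ha hb => (hdsjS a ha).1 hb)
  · intro s hs
    rcases List.mem_append.1 hs with hs | hs
    · exact ⟨(hdsjS s hs).2, by simp⟩
    · exact ⟨hdsjC s hs, by simp⟩

-- the main simulation: one B iteration per layer
lemma pvTop_sim {G : List (List Int)} {y : Int} {n : Nat} (hn : n = G.length)
    (hG : ∀ row ∈ G, ∀ v ∈ row, 0 ≤ v ∧ v < (G.length : Int)) :
    ∀ (fB : Nat) (d : Int) (seenO : List Int) (curD : PySem.Dict Int Int)
      (seenS : List Bool) (vis dst : List Int) (fA : Nat),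
      pvInv n d seenO curD.items [] vis dst →
      seenS.length = n →
      (∀ w : Int, 0 ≤ w → w < (n : Int) → (pvGetB seenS w = true ↔
        w ∈ seenO ∨ w ∈ curD.items.map Prod.fst)) →
      (curD.items.map Prod.fst).length + vis.count 0 + 1 ≤ fA →
      vis.count 0 + 2 ≤ fB →
      pvGoA G y fA (curD.items.map Prod.fst) vis dst = pvGoB G y fB curD seenS := by
  intro fB
  induction fB with
  | zero =>
    intro d seenO curD seenS vis dst fA _ _ _ _ hfB
    omega
  | succ f ihB =>
    intro d seenO curD seenS vis dst fA hInv hsl hseen hfA hfB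
    obtain ⟨hlv, hld, hcur, hnxt, hseenO, hzero, hndS, hndC, hndX, hdsjS, hdsjC⟩ := id hInv
    simp only [pvGoB]
    by_cases hemp : curD.items = []
    · rw [if_pos hemp, hemp]
      cases fA <;> simp [pvGoA]
    · rw [if_neg hemp]
      by_cases hyc : curD.contains y = true
      · rw [if_pos hyc]
        have hyk : y ∈ curD.items.map Prod.fst := by
          rw [PySem.Dict.contains_eq_decide_mem_keys] at hyc
          simpa [PySem.Dict.keys] using hyc
        obtain ⟨⟨py, wy⟩, hp0, hpe⟩ := List.mem_map.1 hyk
        have hpv : py = y := hpe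
        have hp : (y, wy) ∈ curD.items := by rw [← hpv]; exact hp0
        have hget : curD.getD y 0 = wy := PySem.Dict.getD_of_mem_items curD hp
          (by show (curD.items.map Prod.fst).Nodup; exact hndC) 0
        rw [hget]
        have hrun := pvRunToY hn hG hseen hp curD.items (fun q hq => hq) hyk
          PySem.Dict.empty vis dst fA hInv (by simpa using hfA)
        simpa [show (PySem.Dict.empty : PySem.Dict Int Int).items = [] from rfl] using hrun
      · rw [if_neg hyc]
        have hempD : (PySem.Dict.empty : PySem.Dict Int Int).items = [] := rfl
        have hyk : y ∉ curD.items.map Prod.fst := by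
          intro h
          apply hyc
          rw [PySem.Dict.contains_eq_decide_mem_keys]
          simpa [PySem.Dict.keys] using h
        obtain ⟨vis', dst', g1, g2, g3⟩ := pvLayer_sim hn hG hseen hyk curD.items
          (fun q hq => hq) PySem.Dict.empty vis dst fA hInv
          (by rw [hempD]; simpa using hfA)
        rw [show curD.items.map Prod.fst =
            curD.items.map Prod.fst ++
              (PySem.Dict.empty : PySem.Dict Int Int).items.map Prod.fst from by
            rw [hempD]; simp, g1]
        rw [hempD] at g3
        simp only [List.map_nil, List.length_nil] at g3
        have hlencur : curD.items.length = (curD.items.map Prod.fst).length := by simp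
        by_cases hF : (pvLayerB G seenS curD.items PySem.Dict.empty).items = []
        · rw [hF]
          have hfge : 1 ≤ fA - curD.items.length := by omega
          have hfge' : 1 ≤ f := by omega
          rcases Nat.exists_eq_add_of_le hfge with ⟨a, ha⟩
          rcases Nat.exists_eq_add_of_le hfge' with ⟨b, hb⟩
          rw [show fA - curD.items.length = a + 1 from by omega, show f = b + 1 from by omega]
          simp [pvGoA, pvGoB, hF]
        · have hInv2 := pvNextLayer g2
          have hFlen : 1 ≤ ((pvLayerB G seenS curD.items PySem.Dict.empty).items.map
              Prod.fst).length := by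
            rcases h : (pvLayerB G seenS curD.items PySem.Dict.empty).items with _ | _
            · exact absurd h hF
            · simp
          have hksb : ∀ s ∈ (pvLayerB G seenS curD.items PySem.Dict.empty).keys,
              0 ≤ s ∧ s < (n : Int) := by
            intro s hs
            obtain ⟨p, hp, hpe⟩ := List.mem_map.1
              (show s ∈ (pvLayerB G seenS curD.items PySem.Dict.empty).items.map Prod.fst
                from hs)
            obtain ⟨b1, b2, _⟩ := g2.2.2.2.1 p hp
            exact ⟨hpe ▸ b1, hpe ▸ b2⟩
          have hsl2 : ((pvLayerB G seenS curD.items PySem.Dict.empty).keys.foldl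
              (fun s k => pvSetB s k true) seenS).length = n := by
            rw [pvFoldSet_length, hsl]
          have hseen2 : ∀ w : Int, 0 ≤ w → w < (n : Int) →
              (pvGetB ((pvLayerB G seenS curD.items PySem.Dict.empty).keys.foldl
                (fun s k => pvSetB s k true) seenS) w = true ↔
              w ∈ (seenO ++ curD.items.map Prod.fst) ∨
                w ∈ (pvLayerB G seenS curD.items PySem.Dict.empty).items.map Prod.fst) := by
            intro w h1 h2
            rw [pvGetB_foldl_set _ hksb seenS hsl w h1 h2, hseen w h1 h2]
            rw [show (pvLayerB G seenS curD.items PySem.Dict.empty).keys =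
              (pvLayerB G seenS curD.items PySem.Dict.empty).items.map Prod.fst from rfl]
            constructor
            · rintro ((h | h) | h)
              · exact Or.inl (List.mem_append.2 (Or.inl h))
              · exact Or.inl (List.mem_append.2 (Or.inr h))
              · exact Or.inr h
            · rintro (h | h)
              · rcases List.mem_append.1 h with h | h
                exacts [Or.inl (Or.inl h), Or.inl (Or.inr h)]
              · exact Or.inr h
          exact ihB (d + 1) (seenO ++ curD.items.map Prod.fst)
            (pvLayerB G seenS curD.items PySem.Dict.empty) _
            vis' dst' (fA - curD.items.length) hInv2 hsl2 hseen2 (by omega) (by omega)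

lemma pvGetI_replicate0 (m : Nat) (i : Int) : pvGetI (List.replicate m (0 : Int)) i = 0 := by
  unfold pvGetI
  rcases Nat.lt_or_ge (pvIdx i (List.replicate m (0 : Int)).length)
      (List.replicate m (0 : Int)).length with h | h
  · rw [List.getD_eq_getElem?_getD, List.getElem?_eq_getElem h]
    simp
  · rw [List.getD_eq_getElem?_getD, List.getElem?_eq_none h]
    rfl

-- ===== VERDICT (by name: the statement is the Claim_ definition above) =====
theorem bfs_count_paths_spec : Claim_equal_bfs_count_paths := by
  unfold Claim_equal_bfs_count_paths
  intro G x y _ hPre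
  obtain ⟨hx0, hxn, hcase⟩ := hPre
  unfold Spec_bfs_count_paths bfs_count_paths bfs_count_paths_alt
  have hn1 : 1 ≤ G.length := by omega
  have hxnat : pvIdx x G.length < G.length := pvIdx_lt hx0 hxn
  have hItems : ((PySem.Dict.empty : PySem.Dict Int Int).insert x 1).items = [(x, 1)] := rfl
  have hlrep : (List.replicate G.length (0 : Int)).length = G.length := by simp
  have hcontx : ∀ z : Int, ((PySem.Dict.empty : PySem.Dict Int Int).insert x 1).contains z =
      decide (z = x) := by
    intro z
    rw [PySem.Dict.contains_eq_decide_mem_keys]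
    simp [PySem.Dict.keys, hItems]
  by_cases hxy : x = y
  · -- x = y: both sides answer 1 at once
    rcases Nat.exists_eq_add_of_le hn1 with ⟨m, hm⟩
    rw [show G.length + 1 = (m + 1) + 1 from by omega]
    simp only [pvGoA, pvGoB]
    rw [if_pos hxy, if_neg (by rw [hItems]; simp), if_pos (by rw [hcontx, hxy]; simp)]
    rw [show pvGetI (pvSetI (List.replicate G.length 0) x 1) y = 1 from by
      rw [← hxy, pvGetI_set_self _ hlrep hxnat]]
    rw [show ((PySem.Dict.empty : PySem.Dict Int Int).insert x 1).getD y 0 = 1 from by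
      rw [← hxy]; exact PySem.Dict.getD_of_mem_items _ (by rw [hItems]; simp)
        (by rw [show ((PySem.Dict.empty : PySem.Dict Int Int).insert x 1).keys = [x] from rfl]
            simp) 0]
  · rcases hcase with hcase | hcase | hG
    · exact absurd hcase hxy
    · -- the start row is empty and x ≠ y: both sides answer -1
      rcases Nat.exists_eq_add_of_le hn1 with ⟨m, hm⟩
      rw [show G.length + 1 = (m + 1) + 1 from by omega]
      simp only [pvGoA, pvGoB]
      rw [if_neg hxy, if_neg (by rw [hItems]; simp),
        if_neg (by rw [hcontx]; simpa using (fun he => hxy he.symm))]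
      rw [show pvInnerA x (pvRow G x) (pvSetI (List.replicate G.length 0) x 1)
          (List.replicate G.length 0) [] = (pvSetI (List.replicate G.length 0) x 1,
            List.replicate G.length 0, []) from by rw [hcase]; simp [pvInnerA]]
      rw [show pvLayerB G (pvSetB (List.replicate G.length false) x true)
          ((PySem.Dict.empty : PySem.Dict Int Int).insert x 1).items PySem.Dict.empty =
          PySem.Dict.empty from by
        rw [hItems]; simp [pvLayerB]; rw [hcase]; simp [pvRowB]]
      simp [pvGoA, show (PySem.Dict.empty : PySem.Dict Int Int).items = [] from rfl]
    · -- the general case: canonical labels everywhere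
      obtain ⟨hx0', hG⟩ := hG
      have hcnt : (pvSetI (List.replicate G.length (0 : Int)) x 1).count 0 + 1 = G.length := by
        have h := pvCount0_set (List.replicate G.length (0 : Int)) (pvIdx x G.length)
          (by simpa using hxnat) 1
        rw [show (List.replicate G.length (0 : Int))[pvIdx x G.length]'(by simpa using hxnat) =
          0 from List.getElem_replicate ..] at h
        have hidx : pvIdx x (List.replicate G.length (0 : Int)).length = pvIdx x G.length := by
          rw [hlrep]
        simp only [pvSetI, hidx] at h ⊢
        simpa [List.count_replicate] using h
      have hInv0 : pvInv G.length 0 [] [(x, 1)] []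
          (pvSetI (List.replicate G.length (0 : Int)) x 1)
          (List.replicate G.length (0 : Int)) := by
        refine ⟨by simp [pvSetI], by simp, ?_, by simp, by simp, ?_, by simp,
          by simp, by simp, by simp, by simp⟩
        · intro p hp
          have hp' : p = (x, 1) := by simpa using hp
          subst hp'
          refine ⟨hx0', hxn, le_refl 1, ?_, ?_⟩
          · rw [pvGetI_set_self _ hlrep hxnat]
          · exact pvGetI_replicate0 G.length x
        · intro s s0 sn _ hvc _
          simp only [List.map_cons, List.map_nil, List.mem_singleton] at hvc
          rw [pvGetI_set_n hlrep, if_neg (fun hc => hvc (pvIdx_inj s0 sn hx0' hxn hc.1))]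
          exact pvGetI_replicate0 G.length s
      have hlrepB : (List.replicate G.length false).length = G.length := by simp
      have hseen0 : ∀ w : Int, 0 ≤ w → w < (G.length : Int) →
          (pvGetB (pvSetB (List.replicate G.length false) x true) w = true ↔
          w ∈ ([] : List Int) ∨ w ∈ ([(x, 1)] : List (Int × Int)).map Prod.fst) := by
        intro w h1 h2
        rw [pvGetB_set_n hlrepB]
        simp only [List.map_cons, List.map_nil, List.mem_singleton, List.not_mem_nil,
          false_or]
        by_cases he : pvIdx w G.length = pvIdx x G.length
        · rw [if_pos ⟨he, hxnat⟩]
          have hwx : w = x := pvIdx_inj h1 h2 hx0' hxn he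
          simp [hwx]
        · rw [if_neg (fun hc => he hc.1), pvGetB_replicate]
          have hwx : w ≠ x := fun hh => he (by rw [hh])
          simp [hwx]
      have hmain := pvTop_sim (y := y) rfl hG (G.length + 1) 0 []
        ((PySem.Dict.empty : PySem.Dict Int Int).insert x 1)
        (pvSetB (List.replicate G.length false) x true)
        (pvSetI (List.replicate G.length (0 : Int)) x 1) (List.replicate G.length (0 : Int))
        (G.length + 1) (by rw [hItems]; exact hInv0)
        (by rw [pvSetB_length]; simp)
        (by rw [hItems]; exact hseen0)
        (by rw [hItems]; simp; omega) (by omega)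
      rw [show ((PySem.Dict.empty : PySem.Dict Int Int).insert x 1).items.map Prod.fst =
          [x] from by rw [hItems]; rfl] at hmain
      exact hmain
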